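-- pv_equiv track=rewrite | github.com/Yiseull/python-algorithm-solving | 백준/Silver/23814. 아 저는 볶음밥이요/아 저는 볶음밥이요.py | solution
-- ===== SOURCE A (Python) =====
-- def solution(d, n, m, k) -> int:
--     total = (n + m + k) // d
--     while (n // d) + (m // d) + (k // d) != total:
--         extra_n = d - n % d
--         extra_m = d - m % d
--         if extra_n > extra_m:
--             m += extra_m
--             k -= extra_m
--         else:
--             n += extra_n
--             k -= extra_n
--
--     return k
-- ===== SOURCE B (Python) =====
-- def solution(d, n, m, k) -> int:
--     # Closed form: the loop tops up (at most twice) whichever of n, m is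
--     # cheaper to round up to a multiple of d, paying out of k.
--     rn, rm, rk = n % d, m % d, k % d
--     if (rn + rm + rk) // d == 0:
--         return k
--     hi, lo = (rn, rm) if rn >= rm else (rm, rn)
--     if hi + rk < d or rn + rm + rk >= 2 * d:
--         return k - ((d - hi) + (d - lo))
--     return k - (d - hi)
-- ===== Notes on version B (the rewrite author's own statement) =====
-- stated objective: simpler
-- what changed: Replaces A's remainder-redistribution while loop with a direct closed-form case analysis on the remainders n%d, m%d, k%d (the loop provably runs 0, 1 or 2 times for d >= 1, and which case applies is decided by two linear comparisons).
-- outside the precondition, e.g. on solution(0, 1, 1, 1): A raises ZeroDivisionError, B raises ZeroDivisionError; on solution(-2, -3, -3, -3): A returns -2, B returns -1; on solution(-2, 0, 1, 1): A does not finish within the time limit, B returns 4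
import Mathlib
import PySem

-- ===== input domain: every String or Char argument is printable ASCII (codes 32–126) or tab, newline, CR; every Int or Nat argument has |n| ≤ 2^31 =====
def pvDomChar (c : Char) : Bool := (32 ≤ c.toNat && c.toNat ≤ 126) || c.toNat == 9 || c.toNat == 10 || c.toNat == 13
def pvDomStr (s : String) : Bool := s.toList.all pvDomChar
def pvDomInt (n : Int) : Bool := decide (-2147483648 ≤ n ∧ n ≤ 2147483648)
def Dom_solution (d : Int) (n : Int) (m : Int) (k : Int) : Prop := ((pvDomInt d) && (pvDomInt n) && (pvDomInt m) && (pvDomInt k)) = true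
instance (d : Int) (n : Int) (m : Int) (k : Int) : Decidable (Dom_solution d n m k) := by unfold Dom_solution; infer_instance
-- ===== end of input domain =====

-- B replaces A's remainder-redistribution while loop with a closed-form case
-- analysis on the three remainders (objective: simpler).

-- ===== PORT A =====
-- The while loop, as fuel recursion.  For d ≥ 1 (Pre_) the Python loop runs at
-- most 2 iterations, so fuel 3 is enough for the final condition check; the
-- fuel is only a totality guard, it performs the same computation.
def solutionLoop (d : Int) (total : Int) (fuel : Nat) (n : Int) (m : Int) (k : Int) : Int :=
  match fuel with
  | 0 => k
  | Nat.succ fuel =>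
    if PySem.Int.floordiv n d + PySem.Int.floordiv m d + PySem.Int.floordiv k d ≠ total then
      if d - PySem.Int.mod n d > d - PySem.Int.mod m d then
        solutionLoop d total fuel n (m + (d - PySem.Int.mod m d)) (k - (d - PySem.Int.mod m d))
      else
        solutionLoop d total fuel (n + (d - PySem.Int.mod n d)) m (k - (d - PySem.Int.mod n d))
    else k

def solution (d : Int) (n : Int) (m : Int) (k : Int) : Int :=
  solutionLoop d (PySem.Int.floordiv (n + m + k) d) 3 n m k

-- ===== PORT B =====
-- (hi, lo) = (rn, rm) if rn >= rm else (rm, rn), selected by the if.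
def solution_alt (d : Int) (n : Int) (m : Int) (k : Int) : Int :=
  if PySem.Int.floordiv (PySem.Int.mod n d + PySem.Int.mod m d + PySem.Int.mod k d) d = 0 then k
  else if PySem.Int.mod n d ≥ PySem.Int.mod m d then
    if PySem.Int.mod n d + PySem.Int.mod k d < d ∨
       PySem.Int.mod n d + PySem.Int.mod m d + PySem.Int.mod k d ≥ 2 * d then
      k - ((d - PySem.Int.mod n d) + (d - PySem.Int.mod m d))
    else k - (d - PySem.Int.mod n d)
  else
    if PySem.Int.mod m d + PySem.Int.mod k d < d ∨
       PySem.Int.mod n d + PySem.Int.mod m d + PySem.Int.mod k d ≥ 2 * d then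
      k - ((d - PySem.Int.mod m d) + (d - PySem.Int.mod n d))
    else k - (d - PySem.Int.mod m d)

-- ===== PRECONDITION & SPEC =====
-- Pre_ restricts to the problem's natural domain d ≥ 1: for d = 0 A raises
-- ZeroDivisionError, and for d < 0 A's loop diverges on many inputs (and where
-- it happens to return, the value is an accident of the loop's path).
def Pre_solution (d : Int) (n : Int) (m : Int) (k : Int) : Prop := 1 ≤ d
instance (d : Int) (n : Int) (m : Int) (k : Int) : Decidable (Pre_solution d n m k) := by unfold Pre_solution; infer_instance
def pvWitness_solution : Int × Int × Int × Int := (3, 4, 5, 6)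
def Spec_solution (d : Int) (n : Int) (m : Int) (k : Int) (out : Int) : Prop := out = solution_alt d n m k
instance (d : Int) (n : Int) (m : Int) (k : Int) (out : Int) : Decidable (Spec_solution d n m k out) := by unfold Spec_solution; infer_instance

-- ===== CLAIM (what is proved, stated in full; the proofs are below) =====
def Claim_equal_solution : Prop := ∀ (d : Int) (n : Int) (m : Int) (k : Int), Dom_solution d n m k → Pre_solution d n m k → Spec_solution d n m k (solution d n m k)

-- ===== LEMMAS AND PROOFS =====

-- Characterisation of ediv/emod by the division equation (positive divisor).
lemma pv_divmod (d x q r : Int) (hd : 0 < d) (hx : x = d * q + r)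
    (h0 : 0 ≤ r) (hr : r < d) : x / d = q ∧ x % d = r := by
  constructor
  · rw [hx, add_comm, Int.add_mul_ediv_left r q (ne_of_gt hd),
        Int.ediv_eq_zero_of_lt h0 hr, zero_add]
  · rw [hx, add_comm, Int.add_mul_emod_self_left, Int.emod_eq_of_lt h0 hr]

lemma solution_eq_alt (d n m k : Int) (hd : 0 < d) :
    solution d n m k = solution_alt d n m k := by
  have hne : d ≠ 0 := ne_of_gt hd
  simp only [solution, solutionLoop, solution_alt,
    PySem.Int.floordiv_eq_ediv_of_pos hd, PySem.Int.mod_eq_emod_of_pos hd]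
  have hn := Int.ediv_add_emod n d
  have hm := Int.ediv_add_emod m d
  have hk := Int.ediv_add_emod k d
  have hn0 : 0 ≤ n % d := Int.emod_nonneg n hne
  have hn1 : n % d < d := Int.emod_lt_of_pos n hd
  have hm0 : 0 ≤ m % d := Int.emod_nonneg m hne
  have hm1 : m % d < d := Int.emod_lt_of_pos m hd
  have hk0 : 0 ≤ k % d := Int.emod_nonneg k hne
  have hk1 : k % d < d := Int.emod_lt_of_pos k hd
  generalize hrn : n % d = rn at *
  generalize hrm : m % d = rm at *
  generalize hrk : k % d = rk at *
  generalize hqn : n / d = qn at *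
  generalize hqm : m / d = qm at *
  generalize hqk : k / d = qk at *
  rcases Int.lt_or_le (rn + rm + rk) d with hS0 | hS
  · -- no redistribution needed
    obtain ⟨htot, -⟩ := pv_divmod d (n + m + k) (qn + qm + qk) (rn + rm + rk) hd
      (by linear_combination -hn - hm - hk) (by omega) hS0
    obtain ⟨hg, -⟩ := pv_divmod d (rn + rm + rk) 0 (rn + rm + rk) hd (by ring) (by omega) hS0
    rw [htot, hg]
    simp
  · rcases Int.lt_or_le (rn + rm + rk) (2 * d) with hS1 | hS2
    · -- one unit short
      obtain ⟨htot, -⟩ := pv_divmod d (n + m + k) (qn + qm + qk + 1) (rn + rm + rk - d) hd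
        (by linear_combination -hn - hm - hk) (by omega) (by omega)
      obtain ⟨hg, -⟩ := pv_divmod d (rn + rm + rk) 1 (rn + rm + rk - d) hd (by ring) (by omega) (by omega)
      rw [htot, hg]
      rcases Int.lt_or_le rn rm with hbr | hbr
      · -- the loop rounds m first
        obtain ⟨hx1d, hx1m⟩ := pv_divmod d (m + (d - rm)) (qm + 1) 0 hd (by linear_combination -hm) le_rfl hd
        rw [hx1d, hx1m]
        rcases Int.lt_or_le (rm + rk) d with ht | ht
        · -- second rounding (of n) still needed
          obtain ⟨hx2d, -⟩ := pv_divmod d (k - (d - rm)) (qk - 1) (rm + rk) hd (by linear_combination -hk) (by omega) ht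
          obtain ⟨hx3d, -⟩ := pv_divmod d (n + (d - rn)) (qn + 1) 0 hd (by linear_combination -hn) le_rfl hd
          obtain ⟨hx4d, -⟩ := pv_divmod d (k - (d - rm) - (d - rn)) (qk - 1) (rn + rm + rk - d) hd
            (by linear_combination -hk) (by omega) (by omega)
          rw [hx2d, hx3d, hx4d,
              if_pos (show qn + qm + qk ≠ qn + qm + qk + 1 by omega),
              if_pos (show d - rn > d - rm by omega),
              if_pos (show qn + (qm + 1) + (qk - 1) ≠ qn + qm + qk + 1 by omega),
              if_neg (show ¬(d - rn > d - 0) by omega),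
              if_neg (show ¬(qn + 1 + (qm + 1) + (qk - 1) ≠ qn + qm + qk + 1) by omega),
              if_neg (show ¬((1 : Int) = 0) by omega),
              if_neg (show ¬(rn ≥ rm) by omega),
              if_pos (Or.inl ht)]
          omega
        · -- one rounding suffices
          obtain ⟨hx2d, -⟩ := pv_divmod d (k - (d - rm)) qk (rm + rk - d) hd (by linear_combination -hk) (by omega) (by omega)
          rw [hx2d,
              if_pos (show qn + qm + qk ≠ qn + qm + qk + 1 by omega),
              if_pos (show d - rn > d - rm by omega),
              if_neg (show ¬(qn + (qm + 1) + qk ≠ qn + qm + qk + 1) by omega),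
              if_neg (show ¬((1 : Int) = 0) by omega),
              if_neg (show ¬(rn ≥ rm) by omega),
              if_neg (show ¬(rm + rk < d ∨ rn + rm + rk ≥ 2 * d) by omega)]
      · -- the loop rounds n first
        obtain ⟨hx1d, hx1m⟩ := pv_divmod d (n + (d - rn)) (qn + 1) 0 hd (by linear_combination -hn) le_rfl hd
        rw [hx1d, hx1m]
        rcases Int.lt_or_le (rn + rk) d with ht | ht
        · -- second rounding (of m) still needed
          obtain ⟨hx2d, -⟩ := pv_divmod d (k - (d - rn)) (qk - 1) (rn + rk) hd (by linear_combination -hk) (by omega) ht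
          obtain ⟨hx3d, -⟩ := pv_divmod d (m + (d - rm)) (qm + 1) 0 hd (by linear_combination -hm) le_rfl hd
          obtain ⟨hx4d, -⟩ := pv_divmod d (k - (d - rn) - (d - rm)) (qk - 1) (rn + rm + rk - d) hd
            (by linear_combination -hk) (by omega) (by omega)
          rw [hx2d, hx3d, hx4d,
              if_pos (show qn + qm + qk ≠ qn + qm + qk + 1 by omega),
              if_neg (show ¬(d - rn > d - rm) by omega),
              if_pos (show qn + 1 + qm + (qk - 1) ≠ qn + qm + qk + 1 by omega),
              if_pos (show d - 0 > d - rm by omega),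
              if_neg (show ¬(qn + 1 + (qm + 1) + (qk - 1) ≠ qn + qm + qk + 1) by omega),
              if_neg (show ¬((1 : Int) = 0) by omega),
              if_pos (show rn ≥ rm by omega),
              if_pos (Or.inl ht)]
          omega
        · -- one rounding suffices
          obtain ⟨hx2d, -⟩ := pv_divmod d (k - (d - rn)) qk (rn + rk - d) hd (by linear_combination -hk) (by omega) (by omega)
          rw [hx2d,
              if_pos (show qn + qm + qk ≠ qn + qm + qk + 1 by omega),
              if_neg (show ¬(d - rn > d - rm) by omega),
              if_neg (show ¬(qn + 1 + qm + qk ≠ qn + qm + qk + 1) by omega),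
              if_neg (show ¬((1 : Int) = 0) by omega),
              if_pos (show rn ≥ rm by omega),
              if_neg (show ¬(rn + rk < d ∨ rn + rm + rk ≥ 2 * d) by omega)]
    · -- two units short: both n and m get rounded
      obtain ⟨htot, -⟩ := pv_divmod d (n + m + k) (qn + qm + qk + 2) (rn + rm + rk - 2 * d) hd
        (by linear_combination -hn - hm - hk) (by omega) (by omega)
      obtain ⟨hg, -⟩ := pv_divmod d (rn + rm + rk) 2 (rn + rm + rk - 2 * d) hd (by ring) (by omega) (by omega)
      rw [htot, hg]
      rcases Int.lt_or_le rn rm with hbr | hbr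
      · -- the loop rounds m first
        obtain ⟨hx1d, hx1m⟩ := pv_divmod d (m + (d - rm)) (qm + 1) 0 hd (by linear_combination -hm) le_rfl hd
        obtain ⟨hx2d, -⟩ := pv_divmod d (k - (d - rm)) qk (rm + rk - d) hd (by linear_combination -hk) (by omega) (by omega)
        obtain ⟨hx3d, -⟩ := pv_divmod d (n + (d - rn)) (qn + 1) 0 hd (by linear_combination -hn) le_rfl hd
        obtain ⟨hx4d, -⟩ := pv_divmod d (k - (d - rm) - (d - rn)) qk (rn + rm + rk - 2 * d) hd
          (by linear_combination -hk) (by omega) (by omega)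
        rw [hx1d, hx1m, hx2d, hx3d, hx4d,
            if_pos (show qn + qm + qk ≠ qn + qm + qk + 2 by omega),
            if_pos (show d - rn > d - rm by omega),
            if_pos (show qn + (qm + 1) + qk ≠ qn + qm + qk + 2 by omega),
            if_neg (show ¬(d - rn > d - 0) by omega),
            if_neg (show ¬(qn + 1 + (qm + 1) + qk ≠ qn + qm + qk + 2) by omega),
            if_neg (show ¬((2 : Int) = 0) by omega),
            if_neg (show ¬(rn ≥ rm) by omega),
            if_pos (Or.inr hS2)]
        omega
      · -- the loop rounds n first
        obtain ⟨hx1d, hx1m⟩ := pv_divmod d (n + (d - rn)) (qn + 1) 0 hd (by linear_combination -hn) le_rfl hd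
        obtain ⟨hx2d, -⟩ := pv_divmod d (k - (d - rn)) qk (rn + rk - d) hd (by linear_combination -hk) (by omega) (by omega)
        obtain ⟨hx3d, -⟩ := pv_divmod d (m + (d - rm)) (qm + 1) 0 hd (by linear_combination -hm) le_rfl hd
        obtain ⟨hx4d, -⟩ := pv_divmod d (k - (d - rn) - (d - rm)) qk (rn + rm + rk - 2 * d) hd
          (by linear_combination -hk) (by omega) (by omega)
        rw [hx1d, hx1m, hx2d, hx3d, hx4d,
            if_pos (show qn + qm + qk ≠ qn + qm + qk + 2 by omega),
            if_neg (show ¬(d - rn > d - rm) by omega),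
            if_pos (show qn + 1 + qm + qk ≠ qn + qm + qk + 2 by omega),
            if_pos (show d - 0 > d - rm by omega),
            if_neg (show ¬(qn + 1 + (qm + 1) + qk ≠ qn + qm + qk + 2) by omega),
            if_neg (show ¬((2 : Int) = 0) by omega),
            if_pos (show rn ≥ rm by omega),
            if_pos (Or.inr hS2)]
        omega

-- ===== VERDICT (by name: the statement is the Claim_ definition above) =====
theorem solution_spec : Claim_equal_solution := by
  intro d n m k _ hpre
  unfold Spec_solution
  exact solution_eq_alt d n m k (by exact lt_of_lt_of_le Int.zero_lt_one hpre)
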